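-- pv_equiv track=rewrite | github.com/jerry-fuyi/SerialAccessor | jupyter/seracc.py | mask_shr
-- ===== SOURCE A (Python) =====
-- def mask_shr(value, mask):
--     result = 0
--     j = 0
--     for i in range(32):
--         if mask & (1 << i):
--             if value & (1 << i):
--                 result |= 1 << j
--             j += 1
--     return result
-- ===== SOURCE B (Python) =====
-- def mask_shr(value, mask):
--     # Recursive construction over the binary digits: strip bit 0 of both value
--     # and mask, recurse on the halves, then either keep the recursive result as
--     # is (mask bit clear) or append value's low bit arithmetically (2*r + bit).
--     # No bit indices, no output position counter, no OR/shift of the result.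
--     def extract(v, m):
--         if m == 0:
--             return 0
--         r = extract(v >> 1, m >> 1)
--         return 2 * r + (v & 1) if m & 1 else r
--     return extract(value & 0xFFFFFFFF, mask & 0xFFFFFFFF)
-- ===== Notes on version B (the rewrite author's own statement) =====
-- stated objective: alternative
-- what changed: B replaces the indexed 0..31 scan with j-counter and result-bit ORs by a recursion over the binary digits: truncate both arguments to 32 bits, recurse on the halves (v>>1, m>>1), and build the result arithmetically back-to-front as 2*r + (v&1) when the mask's low bit is set; there is no bit index, no output-position counter and no bitwise assembly of the result.
import Mathlib
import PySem

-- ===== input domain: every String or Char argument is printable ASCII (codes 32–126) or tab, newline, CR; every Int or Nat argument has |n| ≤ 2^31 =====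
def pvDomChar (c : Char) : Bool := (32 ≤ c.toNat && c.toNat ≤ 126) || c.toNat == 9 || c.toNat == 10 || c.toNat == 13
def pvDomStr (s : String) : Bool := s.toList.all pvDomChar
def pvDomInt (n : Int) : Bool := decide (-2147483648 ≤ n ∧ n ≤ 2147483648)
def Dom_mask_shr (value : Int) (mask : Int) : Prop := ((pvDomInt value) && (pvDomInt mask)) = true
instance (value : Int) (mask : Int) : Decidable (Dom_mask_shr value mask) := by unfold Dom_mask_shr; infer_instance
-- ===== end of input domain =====

-- B recurses over the binary digits (halving value and mask, building the result
-- arithmetically as 2*r + bit) instead of A's indexed 0..31 scan with a position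
-- counter and result-bit ORs; same return value.

-- ===== PORT A =====
-- loop body of `for i in range(32): ...` (state s = (result, j));
-- `1 << i` / `1 << j` ported as `1 <<< i.toNat`: exact since 0 ≤ i (i ∈ range(32)) and 0 ≤ j
def maskShrStep (value mask : Int) (s : Int × Int) (i : Int) : Int × Int :=
  if PySem.Int.band mask ((1:Int) <<< i.toNat) ≠ 0 then
    (if PySem.Int.band value ((1:Int) <<< i.toNat) ≠ 0 then
       PySem.Int.bor s.1 ((1:Int) <<< s.2.toNat)
     else s.1,
     s.2 + 1)
  else s

def mask_shr (value : Int) (mask : Int) : Int :=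
  ((PySem.List.pyRange 0 32 1).foldl (maskShrStep value mask) (0, 0)).1

-- ===== PORT B =====
-- `def extract(v, m)` from Source B; the guard is `m ≤ 0` instead of `m == 0` only to make
-- the recursion total: it is exact here because 0 ≤ m at every call (m starts as
-- mask & 0xFFFFFFFF ≥ 0 and m >> 1 keeps it nonnegative)
def maskShrExtract (v m : Int) : Int :=
  if _h : m ≤ 0 then 0
  else
    let r := maskShrExtract (v >>> (1:Nat)) (m >>> (1:Nat))
    if PySem.Int.band m 1 ≠ 0 then 2 * r + PySem.Int.band v 1 else r
termination_by m.toNat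
decreasing_by rw [Int.shiftRight_eq_div_pow]; omega

def mask_shr_alt (value : Int) (mask : Int) : Int :=
  maskShrExtract (PySem.Int.band value 0xFFFFFFFF) (PySem.Int.band mask 0xFFFFFFFF)

-- ===== PRECONDITION & SPEC =====
def Spec_mask_shr (value : Int) (mask : Int) (out : Int) : Prop := out = mask_shr_alt value mask
instance (value : Int) (mask : Int) (out : Int) : Decidable (Spec_mask_shr value mask out) := by unfold Spec_mask_shr; infer_instance

-- ===== CLAIM (what is proved, stated in full; the proofs are below) =====
def Claim_equal_mask_shr : Prop := ∀ (value : Int) (mask : Int), Dom_mask_shr value mask → Spec_mask_shr value mask (mask_shr value mask)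

-- ===== LEMMAS AND PROOFS =====

theorem pow32 : (2:Nat) ^ 32 = 4294967296 := by norm_num

-- the low 32 bits of x, as Python sees them (two's complement for negative x)
def pvV (x : Int) : Nat := (x % 4294967296).toNat

theorem pvV_lt (x : Int) : pvV x < 4294967296 := by unfold pvV; omega

theorem pvV_lt_pow (x : Int) : pvV x < 2 ^ 32 := by rw [pow32]; exact pvV_lt x

-- common functional spec: pack the mask-selected bits of v into the low bits of the result
def pext (v m : Nat) : Nat :=
  if _h : m = 0 then 0
  else if m % 2 = 1 then 2 * pext (v / 2) (m / 2) + v % 2 else pext (v / 2) (m / 2)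
termination_by m
decreasing_by all_goals exact Nat.div_lt_self (Nat.pos_of_ne_zero _h) one_lt_two

theorem pext_zero (v : Nat) : pext v 0 = 0 := by rw [pext]; simp

theorem pext_odd (v m : Nat) (h : m % 2 = 1) :
    pext v m = 2 * pext (v / 2) (m / 2) + v % 2 := by
  rw [pext]; have : m ≠ 0 := by omega
  simp [this, h]

theorem pext_even (v m : Nat) (h : m % 2 = 0) :
    pext v m = pext (v / 2) (m / 2) := by
  by_cases h0 : m = 0
  · subst h0; simp [pext_zero]
  · rw [pext]; simp [h0, h]

-- number of set bits among the low n bits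
def popc : Nat → Nat → Nat
  | 0, _ => 0
  | n + 1, m => m % 2 + popc n (m / 2)

-- bit-level homomorphism lemmas
theorem nat_and_bits (a b c d : Nat) (hc : c < 2) (hd : d < 2) :
    (2 * a + c) &&& (2 * b + d) = 2 * (a &&& b) + (c &&& d) := by
  apply Nat.eq_of_testBit_eq
  intro i
  cases i with
  | zero =>
    rw [Nat.testBit_and]
    simp only [Nat.testBit_zero, Nat.mul_add_mod]
    interval_cases c <;> interval_cases d <;> simp
  | succ i =>
    have h1 : (2 * a + c) / 2 = a := by omega
    have h2 : (2 * b + d) / 2 = b := by omega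
    have h3 : (2 * (a &&& b) + (c &&& d)) / 2 = a &&& b := by
      have : c &&& d < 2 := Nat.lt_of_le_of_lt Nat.and_le_right hd
      omega
    rw [Nat.testBit_and, Nat.testBit_succ, Nat.testBit_succ, Nat.testBit_succ,
        h1, h2, h3, Nat.testBit_and]

theorem nat_xor_bits (a b c d : Nat) (hc : c < 2) (hd : d < 2) :
    (2 * a + c) ^^^ (2 * b + d) = 2 * (a ^^^ b) + (c ^^^ d) := by
  apply Nat.eq_of_testBit_eq
  intro i
  cases i with
  | zero =>
    rw [Nat.testBit_xor]
    simp only [Nat.testBit_zero, Nat.mul_add_mod]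
    interval_cases c <;> interval_cases d <;> simp
  | succ i =>
    have h1 : (2 * a + c) / 2 = a := by omega
    have h2 : (2 * b + d) / 2 = b := by omega
    have h3 : (2 * (a ^^^ b) + (c ^^^ d)) / 2 = a ^^^ b := by
      have : c ^^^ d < 2 := by interval_cases c <;> interval_cases d <;> decide
      omega
    rw [Nat.testBit_xor, Nat.testBit_succ, Nat.testBit_succ, Nat.testBit_succ,
        h1, h2, h3, Nat.testBit_xor]

theorem nat_or_bits (a b c d : Nat) (hc : c < 2) (hd : d < 2) :
    (2 * a + c) ||| (2 * b + d) = 2 * (a ||| b) + (c ||| d) := by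
  apply Nat.eq_of_testBit_eq
  intro i
  cases i with
  | zero =>
    rw [Nat.testBit_or]
    simp only [Nat.testBit_zero, Nat.mul_add_mod]
    interval_cases c <;> interval_cases d <;> simp
  | succ i =>
    have h1 : (2 * a + c) / 2 = a := by omega
    have h2 : (2 * b + d) / 2 = b := by omega
    have h3 : (2 * (a ||| b) + (c ||| d)) / 2 = a ||| b := by
      have : c ||| d < 2 := by interval_cases c <;> interval_cases d <;> decide
      omega
    rw [Nat.testBit_or, Nat.testBit_succ, Nat.testBit_succ, Nat.testBit_succ,
        h1, h2, h3, Nat.testBit_or]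

theorem nat_sub_and (l : Nat) : ∀ a, l - (l &&& a) = l ^^^ (l &&& a) := by
  induction l using Nat.strong_induction_on with
  | _ l IH =>
    intro a
    by_cases h0 : l = 0
    · simp [h0]
    · obtain ⟨k, c, hc, rfl⟩ : ∃ k c, c < 2 ∧ l = 2 * k + c :=
        ⟨l / 2, l % 2, by omega, by omega⟩
      obtain ⟨b, d, hd, rfl⟩ : ∃ b d, d < 2 ∧ a = 2 * b + d :=
        ⟨a / 2, a % 2, by omega, by omega⟩
      rw [nat_and_bits k b c d hc hd,
          nat_xor_bits k (k &&& b) c (c &&& d) hc (Nat.lt_of_le_of_lt Nat.and_le_left hc)]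
      have hIH : k - (k &&& b) = k ^^^ (k &&& b) := IH k (by omega) b
      have hbit : c - (c &&& d) = c ^^^ (c &&& d) := by
        interval_cases c <;> interval_cases d <;> decide
      have h1 : k &&& b ≤ k := Nat.and_le_left
      have h2 : c &&& d ≤ c := Nat.and_le_left
      omega

theorem nat_lor_two_pow (j : Nat) : ∀ r, r < 2 ^ j → r ||| 2 ^ j = r + 2 ^ j := by
  induction j with
  | zero => intro r hr; interval_cases r; decide
  | succ j IH =>
    intro r hr
    have h1 : r = 2 * (r / 2) + r % 2 := by omega
    have h2 : (2 : Nat) ^ (j + 1) = 2 * 2 ^ j + 0 := by ring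
    have h3 : r / 2 < 2 ^ j := by omega
    calc r ||| 2 ^ (j + 1)
        = (2 * (r / 2) + r % 2) ||| (2 * 2 ^ j + 0) := by rw [← h1, ← h2]
      _ = 2 * (r / 2 ||| 2 ^ j) + (r % 2 ||| 0) := nat_or_bits _ _ _ _ (by omega) (by omega)
      _ = 2 * (r / 2 + 2 ^ j) + r % 2 := by rw [IH _ h3, Nat.or_zero]
      _ = r + 2 ^ (j + 1) := by omega

theorem nat_and32_congr (a b l : Nat) (hl : l < 2 ^ 32)
    (h : ∀ i, i < 32 → a.testBit i = b.testBit i) : a &&& l = b &&& l := by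
  apply Nat.eq_of_testBit_eq
  intro i
  rw [Nat.testBit_and, Nat.testBit_and]
  by_cases hi : i < 32
  · rw [h i hi]
  · have : l.testBit i = false :=
      Nat.testBit_lt_two_pow (Nat.lt_of_lt_of_le hl (Nat.pow_le_pow_right (by norm_num) (by omega)))
    simp [this]

-- the key bridge: Python's x & b with a nonnegative 32-bit b only sees x's low 32 bits
theorem pvBandNat (x : Int) (l : Nat) (hl : l < 2 ^ 32) :
    PySem.Int.band x (l : Int) = ((pvV x &&& l : Nat) : Int) := by
  have hl0 : (0:Int) ≤ (l : Int) := by positivity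
  by_cases hx : (0:Int) ≤ x
  · rw [PySem.Int.band, if_pos hx, if_pos hl0, Int.toNat_natCast]
    congr 1
    have hV : pvV x = x.toNat % 2 ^ 32 := by unfold pvV; rw [pow32]; omega
    rw [hV]
    apply nat_and32_congr _ _ _ hl
    intro i hi
    rw [Nat.testBit_mod_two_pow]
    simp [hi]
  · rw [PySem.Int.band, if_neg hx, if_pos hl0, Int.toNat_natCast, nat_sub_and]
    congr 1
    set A := (-x - 1).toNat with hA
    have hVx : pvV x = 2 ^ 32 - (A % 2 ^ 32 + 1) := by unfold pvV; rw [pow32]; omega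
    have hAlt : A % 2 ^ 32 < 2 ^ 32 := Nat.mod_lt _ (by norm_num)
    apply Nat.eq_of_testBit_eq
    intro i
    rw [Nat.testBit_xor, Nat.testBit_and, Nat.testBit_and, hVx,
        Nat.testBit_two_pow_sub_succ hAlt, Nat.testBit_mod_two_pow]
    by_cases hi : i < 32
    · simp only [hi, decide_true, Bool.true_and]
      cases hL : l.testBit i <;> cases hAi : A.testBit i <;> simp
    · have hLb : l.testBit i = false :=
        Nat.testBit_lt_two_pow (Nat.lt_of_lt_of_le hl (Nat.pow_le_pow_right (by norm_num) (by omega)))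
      simp [hLb, hi]

theorem pvBandTest (x : Int) (k : Nat) (hk : k < 32) :
    (PySem.Int.band x ((1:Int) <<< k) ≠ 0) ↔ (pvV x).testBit k := by
  have h1 : ((1:Int) <<< k) = ((2 ^ k : Nat) : Int) := by
    rw [Int.shiftLeft_eq]; push_cast; ring
  have h2 : (2:Nat) ^ k < 2 ^ 32 := Nat.pow_lt_pow_right (by norm_num) hk
  rw [h1, pvBandNat x _ h2, Nat.and_two_pow]
  cases h : (pvV x).testBit k <;> simp

-- x & 0xFFFFFFFF is exactly pvV x
theorem pvBand32 (x : Int) : PySem.Int.band x 0xFFFFFFFF = ((pvV x : Nat) : Int) := by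
  have hFF : (0xFFFFFFFF : Int) = ((4294967295 : Nat) : Int) := by norm_num
  rw [hFF, pvBandNat x 4294967295 (by norm_num)]
  congr 1
  apply Nat.eq_of_testBit_eq
  intro i
  rw [Nat.testBit_and]
  by_cases hi : i < 32
  · have hset : (4294967295 : Nat).testBit i = true := by
      have h1 : (4294967295 : Nat) = 2 ^ 32 - 1 := by norm_num
      rw [h1, Nat.testBit_two_pow_sub_one]
      simp [hi]
    simp [hset]
  · have hz : (pvV x).testBit i = false :=
      Nat.testBit_lt_two_pow (Nat.lt_of_lt_of_le (pvV_lt_pow x)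
        (Nat.pow_le_pow_right (by norm_num) (by omega)))
    simp [hz]

-- Nat-level transcription of A's loop body
def stepN (v m : Nat) (s : Nat × Nat) (i : Nat) : Nat × Nat :=
  if m.testBit i then (if v.testBit i then s.1 ||| 2 ^ s.2 else s.1, s.2 + 1) else s

-- A's Int fold equals the Nat fold (indices below 32)
theorem foldA_cast (value mask : Int) : ∀ (ks : List Nat), (∀ k ∈ ks, k < 32) → ∀ r j : Nat,
    (ks.map (fun k => ((k : Nat) : Int))).foldl (maskShrStep value mask) ((r : Int), (j : Int)) =
      (((ks.foldl (stepN (pvV value) (pvV mask)) (r, j)).1 : Int),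
       ((ks.foldl (stepN (pvV value) (pvV mask)) (r, j)).2 : Int)) := by
  intro ks
  induction ks with
  | nil => intro _ r j; simp
  | cons k ks IH =>
    intro hks r j
    have hk : k < 32 := hks k (by simp)
    have hks' : ∀ k' ∈ ks, k' < 32 := fun k' h => hks k' (List.mem_cons_of_mem _ h)
    rw [List.map_cons, List.foldl_cons, List.foldl_cons]
    have hj1 : ((1:Int) <<< (j : Nat)) = ((2 ^ j : Nat) : Int) := by
      rw [Int.shiftLeft_eq]; push_cast; ring
    have hstep : maskShrStep value mask ((r : Int), (j : Int)) ((k : Nat) : Int) =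
        ((((stepN (pvV value) (pvV mask) (r, j) k).1 : Nat) : Int),
         (((stepN (pvV value) (pvV mask) (r, j) k).2 : Nat) : Int)) := by
      have htk : (((k : Nat) : Int)).toNat = k := Int.toNat_natCast k
      by_cases hm : (pvV mask).testBit k
      · have hmI : PySem.Int.band mask ((1:Int) <<< k) ≠ 0 := (pvBandTest mask k hk).mpr hm
        by_cases hv : (pvV value).testBit k
        · have hvI : PySem.Int.band value ((1:Int) <<< k) ≠ 0 := (pvBandTest value k hk).mpr hv
          have hb : PySem.Int.bor ((r : Nat) : Int) ((2:Int) ^ j) = ((r ||| 2 ^ j : Nat) : Int) := by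
            have hc : ((2:Int) ^ j) = ((2 ^ j : Nat) : Int) := by push_cast; ring
            rw [hc, PySem.Int.bor_natCast]
          simp [maskShrStep, stepN, htk, hm, hv, hmI, hvI, hj1, hb]
        · have hvI : PySem.Int.band value ((1:Int) <<< k) = 0 := by
            by_contra hne
            exact hv ((pvBandTest value k hk).mp hne)
          simp [maskShrStep, stepN, htk, hm, hv, hmI, hvI]
      · have hmI : PySem.Int.band mask ((1:Int) <<< k) = 0 := by
          by_contra hne
          exact hm ((pvBandTest mask k hk).mp hne)
        simp [maskShrStep, stepN, htk, hm, hmI]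
    rw [hstep]
    have := IH hks' (stepN (pvV value) (pvV mask) (r, j) k).1
      (stepN (pvV value) (pvV mask) (r, j) k).2
    simpa using this

-- closed form of the Nat fold over range n
theorem foldN_eval : ∀ (n v m r j : Nat), r < 2 ^ j →
    (List.range n).foldl (stepN v m) (r, j) =
      (r + 2 ^ j * pext (v % 2 ^ n) (m % 2 ^ n), j + popc n m) := by
  intro n
  induction n with
  | zero =>
    intro v m r j _
    simp [popc, pext_zero, pow_zero, Nat.mod_one]
  | succ n IH =>
    intro v m r j hr
    rw [List.range_succ_eq_map, List.foldl_cons, List.foldl_map]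
    have hfun : (fun (s : Nat × Nat) (k : Nat) => stepN v m s (Nat.succ k)) =
        stepN (v / 2) (m / 2) := by
      funext s k
      simp [stepN, Nat.testBit_succ]
    rw [hfun]
    have hdiv : ∀ x : Nat, x % 2 ^ (n + 1) / 2 = x / 2 % 2 ^ n := by
      intro x
      have h2 : (2:Nat) ^ (n + 1) = 2 * 2 ^ n := by ring
      rw [h2, Nat.mod_mul_right_div_self]
    have hmod : ∀ x : Nat, x % 2 ^ (n + 1) % 2 = x % 2 := by
      intro x
      exact Nat.mod_mod_of_dvd x (dvd_pow_self 2 (Nat.succ_ne_zero n))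
    by_cases hm : m % 2 = 1
    · have hm' : m.testBit 0 = true := by simp [Nat.testBit_zero, hm]
      have hpx : pext (v % 2 ^ (n + 1)) (m % 2 ^ (n + 1)) =
          2 * pext (v / 2 % 2 ^ n) (m / 2 % 2 ^ n) + v % 2 := by
        rw [pext_odd _ _ (by rw [hmod]; exact hm), hdiv, hdiv, hmod]
      have hstep0 : stepN v m (r, j) 0 = (r + 2 ^ j * (v % 2), j + 1) := by
        by_cases hv : v % 2 = 1
        · have hv' : v.testBit 0 = true := by simp [Nat.testBit_zero, hv]
          simp [stepN, hm', hv', nat_lor_two_pow j r hr, hv]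
        · have hv2 : v % 2 = 0 := by omega
          have hv' : v.testBit 0 = false := by simp [Nat.testBit_zero, hv2]
          simp [stepN, hm', hv', hv2]
      have hvle : 2 ^ j * (v % 2) ≤ 2 ^ j := by
        have hb : v % 2 ≤ 1 := by omega
        calc 2 ^ j * (v % 2) ≤ 2 ^ j * 1 := Nat.mul_le_mul_left _ hb
          _ = 2 ^ j := Nat.mul_one _
      have hrlt : r + 2 ^ j * (v % 2) < 2 ^ (j + 1) := by
        have h3 : (2:Nat) ^ (j + 1) = 2 ^ j + 2 ^ j := by ring
        omega
      rw [hstep0, IH (v / 2) (m / 2) _ (j + 1) hrlt, hpx]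
      have hpopc : popc (n + 1) m = 1 + popc n (m / 2) := by simp [popc, hm]
      rw [hpopc]
      simp only [Prod.mk.injEq]
      constructor
      · rw [pow_succ]; ring
      · omega
    · have hm2 : m % 2 = 0 := by omega
      have hm' : m.testBit 0 = false := by simp [Nat.testBit_zero, hm2]
      have hpx : pext (v % 2 ^ (n + 1)) (m % 2 ^ (n + 1)) =
          pext (v / 2 % 2 ^ n) (m / 2 % 2 ^ n) := by
        rw [pext_even _ _ (by rw [hmod]; exact hm2), hdiv, hdiv]
      have hstep0 : stepN v m (r, j) 0 = (r, j) := by simp [stepN, hm']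
      rw [hstep0, IH (v / 2) (m / 2) r j hr, hpx]
      have hpopc : popc (n + 1) m = popc n (m / 2) := by simp [popc, hm2]
      rw [hpopc]

-- A's port computes pext of the low 32 bits
theorem maskA_eval (value mask : Int) :
    mask_shr value mask = ((pext (pvV value) (pvV mask) : Nat) : Int) := by
  unfold mask_shr
  have hrange : PySem.List.pyRange 0 32 1 = (List.range 32).map (fun k => ((k : Nat) : Int)) := by
    have h32 : ((32:Int) - 0).toNat = 32 := by decide
    rw [PySem.List.pyRange_one, h32]
    simp
  rw [hrange]
  have h00 : ((0:Int), (0:Int)) = (((0:Nat) : Int), ((0:Nat) : Int)) := by norm_num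
  rw [h00, foldA_cast value mask (List.range 32) (fun k hk => List.mem_range.mp hk) 0 0,
      foldN_eval 32 (pvV value) (pvV mask) 0 0 (by norm_num)]
  have h1 : pvV value % 2 ^ 32 = pvV value := Nat.mod_eq_of_lt (pvV_lt_pow value)
  have h2 : pvV mask % 2 ^ 32 = pvV mask := Nat.mod_eq_of_lt (pvV_lt_pow mask)
  rw [h1, h2]
  norm_num

-- Int right shift by one is Nat halving on casts
theorem shr_one_natCast (v : Nat) : ((v : Int) >>> (1:Nat)) = ((v / 2 : Nat) : Int) := by
  rw [Int.shiftRight_eq_div_pow]; omega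

-- B's recursion on Nat casts equals pext
theorem extract_eval : ∀ m v : Nat,
    maskShrExtract (v : Int) (m : Int) = ((pext v m : Nat) : Int) := by
  intro m
  induction m using Nat.strong_induction_on with
  | _ m IH =>
    intro v
    by_cases h0 : m = 0
    · subst h0
      rw [maskShrExtract, pext_zero]
      norm_num
    · have hpos : ¬ ((m : Int) ≤ 0) := by omega
      rw [maskShrExtract]
      simp only [hpos, dite_false]
      rw [shr_one_natCast v, shr_one_natCast m, IH (m / 2) (by omega) (v / 2)]
      have hm1 : PySem.Int.band (m : Int) 1 = ((m &&& 1 : Nat) : Int) := by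
        exact_mod_cast PySem.Int.band_natCast m 1
      have hv1 : PySem.Int.band (v : Int) 1 = ((v &&& 1 : Nat) : Int) := by
        exact_mod_cast PySem.Int.band_natCast v 1
      rw [hm1, hv1, Nat.and_one_is_mod, Nat.and_one_is_mod]
      by_cases hpar : m % 2 = 1
      · have hne : ((m % 2 : Nat) : Int) ≠ 0 := by rw [hpar]; norm_num
        rw [if_pos hne, pext_odd v m hpar]
        push_cast
        ring
      · have hm2 : m % 2 = 0 := by omega
        have heq : ((m % 2 : Nat) : Int) = 0 := by rw [hm2]; norm_num
        rw [if_neg (by simp [heq]), pext_even v m hm2]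

theorem maskB_eval (value mask : Int) :
    mask_shr_alt value mask = ((pext (pvV value) (pvV mask) : Nat) : Int) := by
  unfold mask_shr_alt
  rw [pvBand32 value, pvBand32 mask, extract_eval (pvV mask) (pvV value)]

-- ===== VERDICT (by name: the statement is the Claim_ definition above) =====
theorem mask_shr_spec : Claim_equal_mask_shr := by
  intro value mask _
  unfold Spec_mask_shr
  rw [maskA_eval, maskB_eval]
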